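-- pv_equiv track=rewrite | github.com/sanyabas/cryptoprotocols | 15. shared/main.py | interpolate_polynomial
-- ===== SOURCE A (Python) =====
-- def interpolate_polynomial(x, x_s, y_s, p):
--     k = len(x_s)
--
--     numbers = []
--     dividers = []
--
--     for i in range(k):
--         others = list(x_s)
--         current = others.pop(i)
--
--         numbers.append(eval_pi(x - o for o in others))
--         dividers.append(eval_pi(current - o for o in others))
--
--     divider = eval_pi(dividers)
--     number = sum([divide_mod(numbers[i] * divider * y_s[i] % p, dividers[i], p) for i in range(k)])
--
--     return (divide_mod(number, divider, p) + p) % p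
--
-- def eval_pi(numbers):
--     result = 1
--
--     for number in numbers:
--         result *= number
--
--     return result
--
-- def divide_mod(number: int, divider: int, modulo: int) -> int:
--     return number * extended_euclidean(divider, modulo)
--
-- def extended_euclidean(a: int, b: int) -> int:
--     old_x, x = 0, 1
--     old_y, y = 1, 0
--
--     while b != 0:
--         q = a // b
--
--         a, b = b, a % b
--
--         old_x, x = x - q * old_x, old_x
--         old_y, y = y - q * old_y, old_y
--
--     return x
-- ===== SOURCE B (Python) =====
-- def interpolate_polynomial(x, x_s, y_s, p):
--     k = len(x_s)
--     # sufs[i] is congruent mod p to prod_{j>=i}(x - x_s[j]); sufs[k] == 1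
--     sufs = _suffix_products(x, x_s, p)
--     dividers = [_diff_product(x_s[i], x_s, i, p) for i in range(k)]
--     divider = 1
--     for d in dividers:
--         divider = divider * d % p
--     total = 0
--     pre = 1
--     for i in range(k):
--         total += pre * sufs[i + 1] * divider * y_s[i] % p * _modinv(dividers[i], p)
--         pre = pre * (x - x_s[i]) % p
--     return (total * _modinv(divider, p) + p) % p
--
-- def _suffix_products(x, xs, p):
--     if not xs:
--         return [1]
--     rest = _suffix_products(x, xs[1:], p)
--     return [(x - xs[0]) * rest[0] % p] + rest
--
-- def _diff_product(xi, xs, i, p):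
--     d = 1
--     for j in range(len(xs)):
--         if j != i:
--             d = d * (xi - xs[j]) % p
--     return d
--
-- def _modinv(a, m):
--     old_x, x = 0, 1
--     while m != 0:
--         q = a // m
--         a, m = m, a % m
--         old_x, x = x - q * old_x, old_x
--     return x
-- ===== Notes on version B (the rewrite author's own statement) =====
-- stated objective: faster
-- what changed: B does all arithmetic on residues reduced mod p at every step instead of A's unreduced big-integer products, and gets the k numerator products from one shared suffix-product list plus a running prefix instead of rebuilding each (k-1)-factor product per index.
import Mathlib
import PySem

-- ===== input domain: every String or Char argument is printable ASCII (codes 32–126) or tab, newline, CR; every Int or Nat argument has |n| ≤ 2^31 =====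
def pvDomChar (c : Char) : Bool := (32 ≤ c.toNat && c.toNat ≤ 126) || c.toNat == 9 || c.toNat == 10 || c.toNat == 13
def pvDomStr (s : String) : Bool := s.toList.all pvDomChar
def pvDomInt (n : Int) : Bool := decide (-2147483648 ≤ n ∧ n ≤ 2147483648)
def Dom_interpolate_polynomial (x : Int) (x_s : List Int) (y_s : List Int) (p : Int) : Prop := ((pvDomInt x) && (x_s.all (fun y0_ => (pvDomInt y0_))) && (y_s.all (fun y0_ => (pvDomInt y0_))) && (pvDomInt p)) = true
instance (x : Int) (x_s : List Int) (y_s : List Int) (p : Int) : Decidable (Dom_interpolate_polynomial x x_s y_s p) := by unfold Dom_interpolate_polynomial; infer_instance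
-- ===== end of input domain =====

-- B keeps every intermediate value reduced mod p (word-sized residues instead of A's unreduced
-- big-integer products) and obtains the k numerator products from one shared suffix-product list
-- plus a running prefix, instead of rebuilding each product from scratch; objective: faster.

-- termination helper for the Euclidean loops of BOTH ports (cited in decreasing_by)
lemma pymod_natAbs_lt (a b : Int) (hb : b ≠ 0) : (PySem.Int.mod a b).natAbs < b.natAbs := by
  rcases lt_or_gt_of_ne hb with h | h
  · have := PySem.Int.mod_neg_bounds a h; omega
  · have h1 := PySem.Int.mod_nonneg a h; have h2 := PySem.Int.mod_lt a h; omega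

-- ===== PORT A =====
def eval_pi (numbers : List Int) : Int :=
  numbers.foldl (fun result number => result * number) 1

def extended_euclidean_loop (a b old_x x old_y y : Int) : Int :=
  if h : b = 0 then x
  else
    let q := PySem.Int.floordiv a b
    extended_euclidean_loop b (PySem.Int.mod a b) (x - q * old_x) old_x (y - q * old_y) old_y
termination_by b.natAbs
decreasing_by exact pymod_natAbs_lt a b h

def extended_euclidean (a b : Int) : Int := extended_euclidean_loop a b 0 1 1 0

def divide_mod (number divider modulo : Int) : Int := number * extended_euclidean divider modulo

def interpolate_polynomial (x : Int) (x_s : List Int) (y_s : List Int) (p : Int) : Int :=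
  let k : Int := PySem.List.len x_s
  let nd := (PySem.List.pyRange 0 k 1).foldl
    (fun (st : List Int × List Int) i =>
      let pr := (PySem.List.pop? x_s i).getD (0, [])   -- i is always in range; the default is never used
      let current := pr.1
      let others := pr.2
      (st.1 ++ [eval_pi (others.map (fun o => x - o))],
       st.2 ++ [eval_pi (others.map (fun o => current - o))]))
    ([], [])
  let numbers := nd.1
  let dividers := nd.2
  let divider := eval_pi dividers
  let number := ((PySem.List.pyRange 0 k 1).map (fun i =>
      divide_mod (PySem.Int.mod (PySem.List.pyGetD numbers i 0 * divider * PySem.List.pyGetD y_s i 0) p)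
        (PySem.List.pyGetD dividers i 0) p)).sum
  PySem.Int.mod (divide_mod number divider p + p) p

-- ===== PORT B =====
def modinv_loop (a m old_x x : Int) : Int :=
  if h : m = 0 then x
  else
    let q := PySem.Int.floordiv a m
    modinv_loop m (PySem.Int.mod a m) (x - q * old_x) old_x
termination_by m.natAbs
decreasing_by exact pymod_natAbs_lt a m h

def modinv (a m : Int) : Int := modinv_loop a m 0 1

def suffix_products (x : Int) (xs : List Int) (p : Int) : List Int :=
  match xs with
  | [] => [1]
  | x0 :: rest =>
    let r := suffix_products x rest p
    PySem.Int.mod ((x - x0) * PySem.List.pyGetD r 0 1) p :: r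

def diff_product (xi : Int) (xs : List Int) (i : Int) (p : Int) : Int :=
  (PySem.List.pyRange 0 (PySem.List.len xs) 1).foldl
    (fun d j => if j ≠ i then PySem.Int.mod (d * (xi - PySem.List.pyGetD xs j 0)) p else d) 1

def interpolate_polynomial_alt (x : Int) (x_s : List Int) (y_s : List Int) (p : Int) : Int :=
  let k : Int := PySem.List.len x_s
  let sufs := suffix_products x x_s p
  let dividers := (PySem.List.pyRange 0 k 1).map (fun i =>
      diff_product (PySem.List.pyGetD x_s i 0) x_s i p)
  let divider := dividers.foldl (fun dv d => PySem.Int.mod (dv * d) p) 1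
  let tp := (PySem.List.pyRange 0 k 1).foldl
    (fun (st : Int × Int) i =>
      (st.1 + PySem.Int.mod (st.2 * PySem.List.pyGetD sufs (i + 1) 1 * divider * PySem.List.pyGetD y_s i 0) p
                * modinv (PySem.List.pyGetD dividers i 0) p,
       PySem.Int.mod (st.2 * (x - PySem.List.pyGetD x_s i 0)) p))
    (0, 1)
  PySem.Int.mod (tp.1 * modinv divider p + p) p

-- ===== PRECONDITION & SPEC =====
-- Pre_ excludes exactly the inputs where A raises: p = 0 (ZeroDivisionError on '% p') and
-- len(y_s) < len(x_s) (IndexError on y_s[i]).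
def Pre_interpolate_polynomial (x : Int) (x_s : List Int) (y_s : List Int) (p : Int) : Prop :=
  p ≠ 0 ∧ x_s.length ≤ y_s.length
instance (x : Int) (x_s : List Int) (y_s : List Int) (p : Int) : Decidable (Pre_interpolate_polynomial x x_s y_s p) := by unfold Pre_interpolate_polynomial; infer_instance

def pvWitness_interpolate_polynomial : Int × List Int × List Int × Int := (3, [1, 2], [4, 5], 7)

def Spec_interpolate_polynomial (x : Int) (x_s : List Int) (y_s : List Int) (p : Int) (out : Int) : Prop := out = interpolate_polynomial_alt x x_s y_s p
instance (x : Int) (x_s : List Int) (y_s : List Int) (p : Int) (out : Int) : Decidable (Spec_interpolate_polynomial x x_s y_s p out) := by unfold Spec_interpolate_polynomial; infer_instance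

-- ===== CLAIM (what is proved, stated in full; the proofs are below) =====
def Claim_equal_interpolate_polynomial : Prop := ∀ (x : Int) (x_s : List Int) (y_s : List Int) (p : Int), Dom_interpolate_polynomial x x_s y_s p → Pre_interpolate_polynomial x x_s y_s p → Spec_interpolate_polynomial x x_s y_s p (interpolate_polynomial x x_s y_s p)

-- ===== LEMMAS AND PROOFS =====

-- the x-register thread of A's 4-register Euclidean loop is B's 2-register loop
lemma ext_loop_eq_modinv_loop (n : Nat) : ∀ a b old_x x old_y y : Int, b.natAbs ≤ n →
    extended_euclidean_loop a b old_x x old_y y = modinv_loop a b old_x x := by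
  induction n with
  | zero => intro a b ox xx oy y h
            have hb : b = 0 := by omega
            rw [extended_euclidean_loop, modinv_loop]; simp [hb]
  | succ n ih => intro a b ox xx oy y h
                 rw [extended_euclidean_loop, modinv_loop]
                 by_cases hb : b = 0
                 · simp [hb]
                 · simp only [hb, dite_false]
                   exact ih _ _ _ _ _ _ (by have := pymod_natAbs_lt a b hb; omega)

lemma ext_eq_modinv (a b : Int) : extended_euclidean a b = modinv a b :=
  ext_loop_eq_modinv_loop b.natAbs a b 0 1 1 0 le_rfl

-- mod-congruence: PySem.Int.mod is determined by the residue class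
lemma pymod_congr {p : Int} (hp : p ≠ 0) {a b : Int} (h : a ≡ b [ZMOD p]) :
    PySem.Int.mod a p = PySem.Int.mod b p := by
  have ha := PySem.Int.floordiv_mul_add_mod a p
  have hb := PySem.Int.floordiv_mul_add_mod b p
  have hd : p ∣ (PySem.Int.mod a p - PySem.Int.mod b p) := by
    obtain ⟨c, hc⟩ := h.symm.dvd
    refine ⟨c - PySem.Int.floordiv a p + PySem.Int.floordiv b p, ?_⟩
    have e1 : PySem.Int.mod a p = a - PySem.Int.floordiv a p * p := by omega
    have e2 : PySem.Int.mod b p = b - PySem.Int.floordiv b p * p := by omega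
    rw [e1, e2, show a - PySem.Int.floordiv a p * p - (b - PySem.Int.floordiv b p * p)
        = (a - b) - PySem.Int.floordiv a p * p + PySem.Int.floordiv b p * p from by ring, hc]
    ring
  have hbd : |PySem.Int.mod a p - PySem.Int.mod b p| < |p| := by
    rcases lt_or_gt_of_ne hp with hneg | hpos
    · have h1 := PySem.Int.mod_neg_bounds a hneg; have h2 := PySem.Int.mod_neg_bounds b hneg
      rw [abs_of_neg hneg]; rw [abs_lt]; omega
    · have h1 := PySem.Int.mod_nonneg a hpos; have h2 := PySem.Int.mod_lt a hpos
      have h3 := PySem.Int.mod_nonneg b hpos; have h4 := PySem.Int.mod_lt b hpos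
      rw [abs_of_pos hpos]; rw [abs_lt]; omega
  have := Int.eq_zero_of_abs_lt_dvd ((abs_dvd p _).mpr hd) hbd
  omega

-- mod is congruent to its argument
lemma pymod_modEq (a p : Int) : PySem.Int.mod a p ≡ a [ZMOD p] := by
  have h := PySem.Int.floordiv_mul_add_mod a p
  have : p ∣ a - PySem.Int.mod a p := ⟨PySem.Int.floordiv a p, by rw [Int.mul_comm]; omega⟩
  exact (Int.modEq_iff_dvd.mpr this)

-- a fold of (· * · % p) is congruent to the plain product
lemma foldl_mulmod_modEq (p : Int) (l : List Int) : ∀ a : Int,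
    l.foldl (fun acc t => PySem.Int.mod (acc * t) p) a ≡ a * l.prod [ZMOD p] := by
  induction l with
  | nil => intro a; simp
  | cons h t ih => intro a
                   simp only [List.foldl_cons, List.prod_cons]
                   calc List.foldl (fun acc t => PySem.Int.mod (acc * t) p) (PySem.Int.mod (a * h) p) t
                       ≡ PySem.Int.mod (a * h) p * t.prod [ZMOD p] := ih _
                     _ ≡ (a * h) * t.prod [ZMOD p] := (pymod_modEq (a * h) p).mul_right _
                     _ = a * (h * t.prod) := by ring

lemma eval_pi_eq_prod (l : List Int) : eval_pi l = l.prod := by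
  rw [eval_pi, List.prod_eq_foldl]

-- one unfolding step of B's Euclidean loop: modinv only sees a's residue class
lemma modinv_step (a p : Int) (hp : p ≠ 0) :
    modinv a p = modinv_loop p (PySem.Int.mod a p) 1 0 := by
  rw [modinv]
  conv_lhs => rw [modinv_loop]
  simp [hp]

lemma modinv_congr {p : Int} (hp : p ≠ 0) {a b : Int}
    (h : PySem.Int.mod a p = PySem.Int.mod b p) : modinv a p = modinv b p := by
  rw [modinv_step a p hp, modinv_step b p hp, h]

-- A's per-iteration append of both result lists, as two maps
lemma foldl_pair_append {α : Type} (f g : α → Int) (l : List α) : ∀ (as bs : List Int),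
    l.foldl (fun (st : List Int × List Int) i => (st.1 ++ [f i], st.2 ++ [g i])) (as, bs)
      = (as ++ l.map f, bs ++ l.map g) := by
  induction l with
  | nil => intro as bs; simp
  | cons h t ih => intro as bs; simp [ih]

-- reading consecutive entries of a list by index is a take of its drop
lemma map_getD_range_off (xs : List Int) (a n : Nat) (h : a + n ≤ xs.length) :
    (List.range n).map (fun j => xs.getD (a + j) 0) = (xs.drop a).take n := by
  induction n with
  | zero => simp
  | succ n ih =>
      rw [List.range_succ, List.map_append, ih (by omega), List.take_add_one]
      have h1 : n < (xs.drop a).length := by simp; omega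
      have h2 : a + n < xs.length := by omega
      simp [List.getElem?_eq_getElem h1, List.getD_eq_getElem?_getD, List.getElem?_eq_getElem h2]

-- congruent factors give congruent products
lemma prod_modEq_map {α : Type} {p : Int} (l : List α) (f g : α → Int)
    (h : ∀ a ∈ l, f a ≡ g a [ZMOD p]) : (l.map f).prod ≡ (l.map g).prod [ZMOD p] := by
  induction l with
  | nil => simp
  | cons a t ih =>
      simp only [List.map_cons, List.prod_cons]
      exact (h a (by simp)).mul (ih (fun b hb => h b (by simp [hb])))

-- mathematical running prefix of B's 'pre' variable
def preF (x : Int) (xs : List Int) (p : Int) : Nat → Int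
  | 0 => 1
  | n + 1 => PySem.Int.mod (preF x xs p n * (x - xs.getD n 0)) p

lemma preF_modEq (x : Int) (xs : List Int) (p : Int) (n : Nat) (h : n ≤ xs.length) :
    preF x xs p n ≡ ((xs.take n).map (fun t => x - t)).prod [ZMOD p] := by
  induction n with
  | zero => simp [preF]
  | succ n ih =>
      have hn : n < xs.length := by omega
      rw [preF, List.take_add_one, List.map_append, List.prod_append,
        List.getElem?_eq_getElem hn]
      calc PySem.Int.mod (preF x xs p n * (x - xs.getD n 0)) p
          ≡ preF x xs p n * (x - xs.getD n 0) [ZMOD p] := pymod_modEq _ p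
        _ ≡ ((xs.take n).map (fun t => x - t)).prod * (x - xs.getD n 0) [ZMOD p] :=
            (ih (by omega)).mul_right _
        _ = ((xs.take n).map (fun t => x - t)).prod * ([xs[n]].map (fun t => x - t)).prod := by
            simp [List.getD_eq_getElem?_getD, List.getElem?_eq_getElem hn]

lemma suffix_getD_modEq (x : Int) (p : Int) : ∀ (xs : List Int) (n : Nat), n ≤ xs.length →
    (suffix_products x xs p).getD n 1 ≡ ((xs.drop n).map (fun t => x - t)).prod [ZMOD p] := by
  intro xs
  induction xs with
  | nil =>
      intro n h
      have hn : n = 0 := by simpa using h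
      subst hn; simp [suffix_products]
  | cons x0 rest ih =>
      intro n h
      match n with
      | 0 =>
          simp only [suffix_products, List.getD_cons_zero, List.drop_zero, List.map_cons,
            List.prod_cons, PySem.List.pyGetD_zero]
          calc PySem.Int.mod ((x - x0) * (suffix_products x rest p).getD 0 1) p
              ≡ (x - x0) * (suffix_products x rest p).getD 0 1 [ZMOD p] := pymod_modEq _ p
            _ ≡ (x - x0) * ((rest.drop 0).map (fun t => x - t)).prod [ZMOD p] :=
                (ih 0 (by omega)).mul_left _
            _ = (x - x0) * (rest.map (fun t => x - t)).prod := by simp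
      | n + 1 =>
          simp only [suffix_products, List.getD_cons_succ, List.drop_succ_cons]
          exact ih n (by simpa using h)

-- B's skip-one fold of reduced differences is congruent to A's product over the list minus index n
lemma diff_product_modEq (xi : Int) (xs : List Int) (n : Nat) (p : Int) (hn : n < xs.length) :
    diff_product xi xs (n : Int) p ≡ ((xs.eraseIdx n).map (fun t => xi - t)).prod [ZMOD p] := by
  rw [diff_product]
  simp only [PySem.List.len_eq]
  rw [PySem.List.pyRange_one_append 0 (n : Int) (xs.length : Int) (by positivity) (by exact_mod_cast hn.le),
    PySem.List.pyRange_one_append (n : Int) ((n : Int) + 1) (xs.length : Int) (by omega) (by exact_mod_cast hn),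
    PySem.List.pyRange_one_singleton, List.foldl_append, List.foldl_append]
  -- middle singleton does nothing
  simp only [List.foldl_cons, List.foldl_nil, ne_eq, not_true_eq_false, if_false]
  -- segment 1: indices below n
  have hseg1 : (PySem.List.pyRange 0 (n : Int) 1).foldl
      (fun d j => if j ≠ (n : Int) then PySem.Int.mod (d * (xi - PySem.List.pyGetD xs j 0)) p else d) 1
      = ((xs.take n).map (fun t => xi - t)).foldl (fun acc t => PySem.Int.mod (acc * t) p) 1 := by
    rw [show ((n : Int) = ((n : Nat) : Int)) from rfl, PySem.List.pyRange_zero_nat n, List.foldl_map]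
    rw [PySem.List.foldl_congr_mem (List.range n) _
        (fun d (j : Nat) => PySem.Int.mod (d * (xi - xs.getD j 0)) p) 1
        (by
          intro acc j hj
          have hj' : j < n := List.mem_range.mp hj
          have : ((j : Nat) : Int) ≠ (n : Int) := by exact_mod_cast hj'.ne
          simp [this])]
    have hm : (List.range n).map (fun j => xs.getD j 0) = xs.take n := by
      have := map_getD_range_off xs 0 n (by omega); simpa using this
    rw [← hm, List.map_map]
    exact (List.foldl_map (f := (fun t => xi - t) ∘ (fun j => xs.getD j 0))
      (g := fun acc t => PySem.Int.mod (acc * t) p)).symm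
  -- segment 3: indices above n
  have hlen3 : ((xs.length : Int) - ((n : Int) + 1)).toNat = xs.length - (n + 1) := by omega
  have hseg3 : ∀ d1 : Int, (PySem.List.pyRange ((n : Int) + 1) (xs.length : Int) 1).foldl
      (fun d j => if j ≠ (n : Int) then PySem.Int.mod (d * (xi - PySem.List.pyGetD xs j 0)) p else d) d1
      = ((xs.drop (n + 1)).map (fun t => xi - t)).foldl (fun acc t => PySem.Int.mod (acc * t) p) d1 := by
    intro d1
    rw [PySem.List.pyRange_one, hlen3, List.foldl_map]
    rw [PySem.List.foldl_congr_mem (List.range (xs.length - (n + 1))) _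
        (fun d (k : Nat) => PySem.Int.mod (d * (xi - xs.getD (n + 1 + k) 0)) p) d1
        (by
          intro acc k _
          have h2 : ((n : Int) + 1 + ((k : Nat) : Int)) = (((n + 1 + k : Nat)) : Int) := by
            push_cast; ring
          have h1 : ((n : Int) + 1 + ((k : Nat) : Int)) ≠ (n : Int) := by omega
          rw [if_pos h1, h2, PySem.List.pyGetD_natCast])]
    have hm : (List.range (xs.length - (n + 1))).map (fun k => xs.getD (n + 1 + k) 0)
        = xs.drop (n + 1) := by
      have h1 := map_getD_range_off xs (n + 1) (xs.length - (n + 1)) (by omega)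
      rw [h1, List.take_of_length_le (by simp)]
    rw [← hm, List.map_map]
    exact (List.foldl_map (f := (fun t => xi - t) ∘ (fun k => xs.getD (n + 1 + k) 0))
      (g := fun acc t => PySem.Int.mod (acc * t) p)).symm
  rw [hseg1, hseg3]
  calc ((xs.drop (n + 1)).map (fun t => xi - t)).foldl (fun acc t => PySem.Int.mod (acc * t) p)
        (((xs.take n).map (fun t => xi - t)).foldl (fun acc t => PySem.Int.mod (acc * t) p) 1)
      ≡ (((xs.take n).map (fun t => xi - t)).foldl (fun acc t => PySem.Int.mod (acc * t) p) 1)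
          * ((xs.drop (n + 1)).map (fun t => xi - t)).prod [ZMOD p] := foldl_mulmod_modEq p _ _
    _ ≡ (1 * ((xs.take n).map (fun t => xi - t)).prod)
          * ((xs.drop (n + 1)).map (fun t => xi - t)).prod [ZMOD p] :=
        (foldl_mulmod_modEq p _ 1).mul_right _
    _ = ((xs.eraseIdx n).map (fun t => xi - t)).prod := by
        rw [List.eraseIdx_eq_take_drop_succ, List.map_append, List.prod_append]; ring

-- named values of A's intermediate quantities
def numA (x : Int) (xs : List Int) (j : Nat) : Int := ((xs.eraseIdx j).map (fun t => x - t)).prod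
def divA (xs : List Int) (j : Nat) : Int := ((xs.eraseIdx j).map (fun t => xs.getD j 0 - t)).prod
def DivA (xs : List Int) : Int := ((List.range xs.length).map (divA xs)).prod

-- what A computes, written over Nat indices
lemma A_char (x : Int) (xs ys : List Int) (p : Int) : interpolate_polynomial x xs ys p
    = PySem.Int.mod ((((List.range xs.length).map (fun j =>
        PySem.Int.mod (numA x xs j * DivA xs * ys.getD j 0) p
          * extended_euclidean (divA xs j) p)).sum)
        * extended_euclidean (DivA xs) p + p) p := by
  simp only [interpolate_polynomial, divide_mod, PySem.List.len_eq]
  rw [foldl_pair_append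
    (fun i => eval_pi ((((PySem.List.pop? xs i).getD (0, [])).2).map (fun o => x - o)))
    (fun i => eval_pi ((((PySem.List.pop? xs i).getD (0, [])).2).map
      (fun o => ((PySem.List.pop? xs i).getD (0, [])).1 - o)))
    (PySem.List.pyRange 0 (xs.length : Int) 1) [] []]
  simp only [List.nil_append]
  rw [PySem.List.pyRange_zero_nat xs.length]
  simp only [List.map_map]
  have hFA : (List.range xs.length).map
      ((fun i => eval_pi ((((PySem.List.pop? xs i).getD (0, [])).2).map (fun o => x - o)))
        ∘ (fun k : Nat => (k : Int)))
      = (List.range xs.length).map (numA x xs) := by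
    refine List.map_congr_left (fun j hj => ?_)
    have hj' : j < xs.length := List.mem_range.mp hj
    simp only [Function.comp_apply, PySem.List.pop?_natCast xs j hj', Option.getD_some,
      eval_pi_eq_prod, numA]
  have hGA : (List.range xs.length).map
      ((fun i => eval_pi ((((PySem.List.pop? xs i).getD (0, [])).2).map
        (fun o => ((PySem.List.pop? xs i).getD (0, [])).1 - o)))
        ∘ (fun k : Nat => (k : Int)))
      = (List.range xs.length).map (divA xs) := by
    refine List.map_congr_left (fun j hj => ?_)
    have hj' : j < xs.length := List.mem_range.mp hj
    simp only [Function.comp_apply, PySem.List.pop?_natCast xs j hj', Option.getD_some,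
      eval_pi_eq_prod, divA, List.getD_eq_getElem xs 0 hj']
  rw [hFA, hGA]
  rw [show eval_pi ((List.range xs.length).map (divA xs)) = DivA xs from by
    rw [eval_pi_eq_prod, DivA]]
  congr 2
  refine congrArg (fun s => s * extended_euclidean (DivA xs) p) ?_
  refine congrArg List.sum (List.map_congr_left (fun j hj => ?_))
  have hj' : j < xs.length := List.mem_range.mp hj
  simp only [Function.comp_apply, PySem.List.pyGetD_natCast,
    PySem.List.getD_map_range _ _ _ _ hj']

-- named values of B's intermediate quantities
def divBi (xs : List Int) (p : Int) (j : Nat) : Int := diff_product (xs.getD j 0) xs (j : Int) p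
def divB (xs : List Int) (p : Int) : Int :=
  ((List.range xs.length).map (divBi xs p)).foldl (fun dv d => PySem.Int.mod (dv * d) p) 1

-- loop invariant of B's accumulation loop: running sum of the reduced terms, running prefix product
lemma alt_fold_inv (x p divider : Int) (xs ys sufs dividers : List Int) (m : Nat) :
    ((List.range m).map (fun k : Nat => (k : Int))).foldl
      (fun (st : Int × Int) i =>
        (st.1 + PySem.Int.mod (st.2 * PySem.List.pyGetD sufs (i + 1) 1 * divider * PySem.List.pyGetD ys i 0) p
                  * modinv (PySem.List.pyGetD dividers i 0) p,
         PySem.Int.mod (st.2 * (x - PySem.List.pyGetD xs i 0)) p)) (0, 1)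
    = (((List.range m).map (fun j =>
         PySem.Int.mod (preF x xs p j * sufs.getD (j + 1) 1 * divider * ys.getD j 0) p
           * modinv (dividers.getD j 0) p)).sum,
       preF x xs p m) := by
  induction m with
  | zero => simp [preF]
  | succ m ih =>
      rw [List.range_succ, List.map_append, List.foldl_append, ih, List.map_append, List.sum_append]
      simp only [List.map_cons, List.map_nil, List.foldl_cons, List.foldl_nil, List.sum_cons,
        List.sum_nil, add_zero]
      have hc : ((m : Int) + 1) = (((m + 1 : Nat)) : Int) := by push_cast; ring
      rw [hc]
      simp only [PySem.List.pyGetD_natCast]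
      rfl

-- what B computes, written over Nat indices
lemma B_char (x : Int) (xs ys : List Int) (p : Int) : interpolate_polynomial_alt x xs ys p
    = PySem.Int.mod ((((List.range xs.length).map (fun j =>
        PySem.Int.mod (preF x xs p j * (suffix_products x xs p).getD (j + 1) 1
            * divB xs p * ys.getD j 0) p
          * modinv (divBi xs p j) p)).sum)
        * modinv (divB xs p) p + p) p := by
  simp only [interpolate_polynomial_alt, PySem.List.len_eq]
  have hdl : (PySem.List.pyRange 0 (xs.length : Int) 1).map
      (fun i => diff_product (PySem.List.pyGetD xs i 0) xs i p)
      = (List.range xs.length).map (divBi xs p) := by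
    rw [PySem.List.pyRange_zero_nat xs.length, List.map_map]
    refine List.map_congr_left (fun j hj => ?_)
    simp only [Function.comp_apply, PySem.List.pyGetD_natCast, divBi]
  rw [hdl]
  rw [show ((List.range xs.length).map (divBi xs p)).foldl
      (fun dv d => PySem.Int.mod (dv * d) p) 1 = divB xs p from rfl]
  rw [PySem.List.pyRange_zero_nat xs.length]
  rw [alt_fold_inv x p (divB xs p) xs ys (suffix_products x xs p)
      ((List.range xs.length).map (divBi xs p)) xs.length]
  congr 2
  refine congrArg (fun s => s * modinv (divB xs p) p) ?_
  refine congrArg List.sum (List.map_congr_left (fun j hj => ?_))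
  have hj' : j < xs.length := List.mem_range.mp hj
  rw [PySem.List.getD_map_range _ _ _ _ hj']

-- ===== VERDICT (by name: the statement is the Claim_ definition above) =====
theorem interpolate_polynomial_spec : Claim_equal_interpolate_polynomial := by
  intro x xs ys p _ hpre
  obtain ⟨hp, hlen⟩ := hpre
  unfold Spec_interpolate_polynomial
  rw [A_char, B_char]
  have hdiv : divB xs p ≡ DivA xs [ZMOD p] := by
    calc divB xs p
        ≡ 1 * ((List.range xs.length).map (divBi xs p)).prod [ZMOD p] := foldl_mulmod_modEq p _ 1
      _ = ((List.range xs.length).map (divBi xs p)).prod := one_mul _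
      _ ≡ ((List.range xs.length).map (divA xs)).prod [ZMOD p] :=
          prod_modEq_map _ _ _ (fun j hj =>
            diff_product_modEq (xs.getD j 0) xs j p (List.mem_range.mp hj))
      _ = DivA xs := rfl
  have hmodDiv : PySem.Int.mod (DivA xs) p = PySem.Int.mod (divB xs p) p :=
    pymod_congr hp hdiv.symm
  have hext : extended_euclidean (DivA xs) p = modinv (divB xs p) p := by
    rw [ext_eq_modinv]; exact modinv_congr hp hmodDiv
  have hterm : (List.range xs.length).map (fun j =>
        PySem.Int.mod (numA x xs j * DivA xs * ys.getD j 0) p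
          * extended_euclidean (divA xs j) p)
      = (List.range xs.length).map (fun j =>
        PySem.Int.mod (preF x xs p j * (suffix_products x xs p).getD (j + 1) 1
            * divB xs p * ys.getD j 0) p
          * modinv (divBi xs p j) p) := by
    refine List.map_congr_left (fun j hj => ?_)
    have hj' : j < xs.length := List.mem_range.mp hj
    have hsplit : numA x xs j
        = ((xs.take j).map (fun t => x - t)).prod * ((xs.drop (j + 1)).map (fun t => x - t)).prod := by
      rw [numA, List.eraseIdx_eq_take_drop_succ, List.map_append, List.prod_append]
    have h1 : preF x xs p j * (suffix_products x xs p).getD (j + 1) 1 * divB xs p * ys.getD j 0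
        ≡ numA x xs j * DivA xs * ys.getD j 0 [ZMOD p] := by
      rw [hsplit]
      exact (((preF_modEq x xs p j hj'.le).mul
        (suffix_getD_modEq x p xs (j + 1) (by omega))).mul hdiv).mul (Int.ModEq.refl _)
    have h2 : extended_euclidean (divA xs j) p = modinv (divBi xs p j) p := by
      rw [ext_eq_modinv]
      exact modinv_congr hp (pymod_congr hp (diff_product_modEq (xs.getD j 0) xs j p hj').symm)
    rw [pymod_congr hp h1.symm, h2]
  rw [hterm, hext]
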